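-- pv_equiv track=rewrite | github.com/jeonhaelee/2022_programmers_python | prac39.py | solution
-- ===== SOURCE A (Python) =====
-- def solution(A,B):
--     answer = 0
--     A.sort()
--     B.sort(reverse=True)
--     while len(A) > 0:
--         answer += (A[0]*B[0])
--         del A[0]
--         del B[0]
--     return answer
-- ===== SOURCE B (Python) =====
-- def solution(A, B):
--     return sum(a * b for a, b in zip(sorted(A), sorted(B, reverse=True)))
-- ===== Notes on version B (the rewrite author's own statement) =====
-- stated objective: faster
-- what changed: Replaces the destructive while-loop that repeatedly deletes the front element of both lists (O(n) per deletion) with a single index-free pass: zip the two sorted lists and sum the products.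
import Mathlib
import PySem

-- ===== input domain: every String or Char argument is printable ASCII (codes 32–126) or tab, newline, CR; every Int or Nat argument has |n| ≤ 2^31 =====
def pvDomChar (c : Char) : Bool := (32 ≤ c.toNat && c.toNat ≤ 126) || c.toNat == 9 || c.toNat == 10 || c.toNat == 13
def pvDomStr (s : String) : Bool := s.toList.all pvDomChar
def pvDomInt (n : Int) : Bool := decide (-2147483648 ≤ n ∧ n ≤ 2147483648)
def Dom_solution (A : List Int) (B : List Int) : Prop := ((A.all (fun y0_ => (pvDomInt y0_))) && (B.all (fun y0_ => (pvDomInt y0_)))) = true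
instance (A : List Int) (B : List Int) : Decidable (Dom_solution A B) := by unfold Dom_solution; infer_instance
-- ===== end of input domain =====

-- B replaces A's destructive delete-from-front while-loop by one pass over the zip of
-- the two sorted lists (faster in a timing run). Python A mutates its arguments in
-- place (sorts and empties them); the equivalence proved here is about the return value only.

-- ===== PORT A =====
-- A's while-loop: pop the fronts of both lists, accumulating the product. The case
-- 'A nonempty, B empty' is where Python raises IndexError; it is excluded by Pre_solution.
def solutionLoop (a b : List Int) (answer : Int) : Int :=
  match a, b with
  | [], _ => answer
  | x :: xs, y :: ys => solutionLoop xs ys (answer + x * y)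
  | _ :: _, [] => answer

def solution (A : List Int) (B : List Int) : Int :=
  solutionLoop (PySem.List.sorted A (fun x => x) false) (PySem.List.sorted B (fun x => x) true) 0

-- ===== PORT B =====
def solution_alt (A : List Int) (B : List Int) : Int :=
  (((PySem.List.sorted A (fun x => x) false).zip (PySem.List.sorted B (fun x => x) true)).map
    (fun p => p.1 * p.2)).sum

-- ===== PRECONDITION & SPEC =====
-- Pre_ excludes A longer than B: there Python A raises IndexError on B[0].
def Pre_solution (A : List Int) (B : List Int) : Prop := A.length ≤ B.length
instance (A : List Int) (B : List Int) : Decidable (Pre_solution A B) := by unfold Pre_solution; infer_instance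
def pvWitness_solution : List Int × List Int := ([3, 1, 2], [5, 4, 6])

def Spec_solution (A : List Int) (B : List Int) (out : Int) : Prop := out = solution_alt A B
instance (A : List Int) (B : List Int) (out : Int) : Decidable (Spec_solution A B out) := by unfold Spec_solution; infer_instance

-- ===== CLAIM (what is proved, stated in full; the proofs are below) =====
def Claim_equal_solution : Prop := ∀ (A : List Int) (B : List Int), Dom_solution A B → Pre_solution A B → Spec_solution A B (solution A B)

-- ===== LEMMAS AND PROOFS =====
theorem solutionLoop_eq_zip (a : List Int) : ∀ (b : List Int) (acc : Int),
    solutionLoop a b acc = acc + ((a.zip b).map (fun p => p.1 * p.2)).sum := by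
  induction a with
  | nil => intro b acc; simp [solutionLoop]
  | cons x xs ih =>
    intro b acc
    cases b with
    | nil => simp [solutionLoop]
    | cons y ys => simp [solutionLoop, ih]; ring

-- ===== VERDICT (by name: the statement is the Claim_ definition above) =====
theorem solution_spec : Claim_equal_solution := by
  intro A B _ _
  unfold Spec_solution solution solution_alt
  simp [solutionLoop_eq_zip]
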